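-- pv_equiv track=rewrite | github.com/CriMenghini/daf-monitopa | server/src/utils.py | tweet_hashtags
-- ===== SOURCE A (Python) =====
-- from collections import defaultdict
--
-- def tweet_hashtags(hashtags_dict, list_hashtags):
--
--     hashtags_dict = {i: [k for k in j if k in list_hashtags] for i,j in hashtags_dict.items()}
--
--     dict_hashtag = defaultdict(list)
--     #list_id_toscana = []
--     for tag in list_hashtags:
--         for i, l in hashtags_dict.items():
--             if tag in l:
--                 dict_hashtag[tag] += [i]
--
--     dict_list_hashtag = defaultdict(list)
--     #list_id_toscana = []
--     for tag in list_hashtags: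
--         for i, l in hashtags_dict.items():
--             if tag in l:
--                 dict_list_hashtag[tag] += [j for j in l if j!=tag and j in list_hashtags]
--
--     return hashtags_dict, dict_hashtag, dict_list_hashtag
-- ===== SOURCE B (Python) =====
-- def tweet_hashtags(hashtags_dict, list_hashtags):
--     allowed = set(list_hashtags)
--     filtered = {i: [k for k in j if k in allowed] for i, j in hashtags_dict.items()}
--
--     # one pass over the filtered dict builds both inverted indexes
--     index_ids = {}
--     index_cotags = {}
--     for i, l in filtered.items():
--         for t in dict.fromkeys(l):
--             index_ids.setdefault(t, []).append(i)
--             index_cotags.setdefault(t, []).extend(j for j in l if j != t and j in allowed)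
--
--     # assemble outputs in the order (and multiplicity) prescribed by list_hashtags
--     dict_hashtag = {}
--     dict_list_hashtag = {}
--     for tag in list_hashtags:
--         if tag in index_ids:
--             dict_hashtag.setdefault(tag, []).extend(index_ids[tag])
--             dict_list_hashtag.setdefault(tag, []).extend(index_cotags[tag])
--     return filtered, dict_hashtag, dict_list_hashtag
-- ===== Notes on version B (the rewrite author's own statement) =====
-- stated objective: faster
-- what changed: Instead of rescanning the whole id->hashtags dict once per tag per output dict (A's two nested loops over list_hashtags x items), B makes a single pass over the filtered dict building two inverted indexes (tag -> ids, tag -> co-occurring tags) and then assembles both outputs with one lookup loop over list_hashtags.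
import Mathlib
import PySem

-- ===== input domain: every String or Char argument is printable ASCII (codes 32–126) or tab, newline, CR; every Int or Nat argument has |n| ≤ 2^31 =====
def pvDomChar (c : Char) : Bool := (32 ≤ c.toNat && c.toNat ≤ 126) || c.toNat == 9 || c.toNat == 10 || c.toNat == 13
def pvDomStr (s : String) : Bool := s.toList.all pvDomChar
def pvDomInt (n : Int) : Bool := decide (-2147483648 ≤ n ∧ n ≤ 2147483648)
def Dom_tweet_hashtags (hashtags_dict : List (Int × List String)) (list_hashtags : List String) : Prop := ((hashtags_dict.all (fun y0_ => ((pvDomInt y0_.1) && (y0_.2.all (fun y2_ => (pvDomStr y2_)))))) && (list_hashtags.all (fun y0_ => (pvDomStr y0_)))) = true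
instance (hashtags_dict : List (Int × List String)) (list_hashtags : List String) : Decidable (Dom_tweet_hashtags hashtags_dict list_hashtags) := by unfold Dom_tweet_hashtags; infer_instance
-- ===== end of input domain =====

-- B builds two inverted indexes (tag → ids, tag → co-tags) in ONE pass over the filtered dict,
-- then assembles the outputs by a single loop over list_hashtags, instead of A's rescans of the
-- whole dict for every tag occurrence (objective: faster).

-- ===== PORT A =====
def tweet_hashtags (hashtags_dict : List (Int × List String)) (list_hashtags : List String) : (List (Int × List String)) × (List (String × List Int)) × (List (String × List String)) :=
  -- hashtags_dict = {i: [k for k in j if k in list_hashtags] for i, j in hashtags_dict.items()}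
  let filtered : PySem.Dict Int (List String) :=
    hashtags_dict.foldl (fun d p => d.insert p.1 (p.2.filter (fun k => list_hashtags.contains k))) PySem.Dict.empty
  -- for tag in list_hashtags: for i, l in hashtags_dict.items(): if tag in l: dict_hashtag[tag] += [i]
  let dict_hashtag : PySem.Dict String (List Int) :=
    list_hashtags.foldl (fun d tag =>
      filtered.items.foldl (fun d p =>
        if p.2.contains tag then d.insert tag (d.getD tag [] ++ [p.1]) else d) d) PySem.Dict.empty
  -- for tag in list_hashtags: for i, l in hashtags_dict.items(): if tag in l:
  --   dict_list_hashtag[tag] += [j for j in l if j != tag and j in list_hashtags]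
  let dict_list_hashtag : PySem.Dict String (List String) :=
    list_hashtags.foldl (fun d tag =>
      filtered.items.foldl (fun d p =>
        if p.2.contains tag then
          d.insert tag (d.getD tag [] ++ p.2.filter (fun j => j != tag && list_hashtags.contains j))
        else d) d) PySem.Dict.empty
  (filtered.items, dict_hashtag.items, dict_list_hashtag.items)

-- ===== PORT B =====
def tweet_hashtags_alt (hashtags_dict : List (Int × List String)) (list_hashtags : List String) : (List (Int × List String)) × (List (String × List Int)) × (List (String × List String)) :=
  let allowed : PySem.Set String := PySem.Set.ofList list_hashtags
  let filtered : PySem.Dict Int (List String) :=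
    hashtags_dict.foldl (fun d p => d.insert p.1 (p.2.filter (fun k => PySem.Set.contains allowed k))) PySem.Dict.empty
  -- one pass over filtered.items() builds both inverted indexes
  let idx : PySem.Dict String (List Int) × PySem.Dict String (List String) :=
    filtered.items.foldl (fun idx p =>
      (PySem.List.dedup p.2).foldl (fun idx t =>
        (idx.1.insert t (idx.1.getD t [] ++ [p.1]),
         idx.2.insert t (idx.2.getD t [] ++ p.2.filter (fun j => j != t && PySem.Set.contains allowed j)))) idx)
      (PySem.Dict.empty, PySem.Dict.empty)
  -- assemble outputs in the order (and multiplicity) prescribed by list_hashtags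
  let out : PySem.Dict String (List Int) × PySem.Dict String (List String) :=
    list_hashtags.foldl (fun o tag =>
      if idx.1.contains tag then
        (o.1.insert tag (o.1.getD tag [] ++ idx.1.getD tag []),
         o.2.insert tag (o.2.getD tag [] ++ idx.2.getD tag []))
      else o) (PySem.Dict.empty, PySem.Dict.empty)
  (filtered.items, out.1.items, out.2.items)

-- ===== PRECONDITION & SPEC =====
def Spec_tweet_hashtags (hashtags_dict : List (Int × List String)) (list_hashtags : List String) (out : (List (Int × List String)) × (List (String × List Int)) × (List (String × List String))) : Prop := out = tweet_hashtags_alt hashtags_dict list_hashtags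
instance (hashtags_dict : List (Int × List String)) (list_hashtags : List String) (out : (List (Int × List String)) × (List (String × List Int)) × (List (String × List String))) : Decidable (Spec_tweet_hashtags hashtags_dict list_hashtags out) := by unfold Spec_tweet_hashtags; infer_instance

-- ===== CLAIM (what is proved, stated in full; the proofs are below) =====
def Claim_equal_tweet_hashtags : Prop := ∀ (hashtags_dict : List (Int × List String)) (list_hashtags : List String), Dom_tweet_hashtags hashtags_dict list_hashtags → Spec_tweet_hashtags hashtags_dict list_hashtags (tweet_hashtags hashtags_dict list_hashtags)

-- ===== LEMMAS AND PROOFS =====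

-- the block a tag accumulates over the entries: concatenation of f tag p over matching entries
def pvBlk {β : Type} (f : String → Int × List String → List β) (t : String) (E : List (Int × List String)) : List β :=
  E.flatMap (fun p => if p.2.contains t then f t p else [])

theorem pvBlk_nil_of_not_any {β : Type} (f : String → Int × List String → List β) (t : String)
    (E : List (Int × List String)) (h : E.any (fun p => p.2.contains t) = false) :
    pvBlk f t E = [] := by
  induction E with
  | nil => rfl
  | cons p E ih =>
    simp only [List.any_cons, Bool.or_eq_false_iff] at h
    simp only [pvBlk, List.flatMap_cons, h.1, Bool.false_eq_true, if_false, List.nil_append]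
    exact ih h.2

theorem pvBlk_cons_pos {β : Type} (f : String → Int × List String → List β) (t : String)
    (p : Int × List String) (E : List (Int × List String)) (h : p.2.contains t = true) :
    pvBlk f t (p :: E) = f t p ++ pvBlk f t E := by
  unfold pvBlk
  rw [List.flatMap_cons, if_pos h]

theorem pvBlk_cons_neg {β : Type} (f : String → Int × List String → List β) (t : String)
    (p : Int × List String) (E : List (Int × List String)) (h : p.2.contains t = false) :
    pvBlk f t (p :: E) = pvBlk f t E := by
  unfold pvBlk
  rw [List.flatMap_cons, if_neg (by rw [h]; simp), List.nil_append]

-- A's inner loop over the entries collapses to one append of the whole block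
theorem pvInnerA {β : Type} (f : String → Int × List String → List β) (t : String)
    (E : List (Int × List String)) (d : PySem.Dict String (List β)) :
    E.foldl (fun d p => if p.2.contains t then d.insert t (d.getD t [] ++ f t p) else d) d
      = if E.any (fun p => p.2.contains t) then d.insert t (d.getD t [] ++ pvBlk f t E) else d := by
  induction E generalizing d with
  | nil => simp
  | cons p E ih =>
    rw [List.foldl_cons, List.any_cons]
    by_cases h : p.2.contains t = true
    · rw [if_pos h, pvBlk_cons_pos f t p E h, h, Bool.true_or, if_pos rfl, ih]
      by_cases hE : E.any (fun p => p.2.contains t) = true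
      · rw [if_pos hE, PySem.Dict.getD_insert_self, PySem.Dict.insert_insert_self, List.append_assoc]
      · have hE' : E.any (fun p => p.2.contains t) = false := by simpa using hE
        rw [if_neg hE, pvBlk_nil_of_not_any f t E hE', List.append_nil]
    · have h' : p.2.contains t = false := by simpa using h
      rw [if_neg h, pvBlk_cons_neg f t p E h', h', Bool.false_or, ih]

-- B's inner loop over the distinct tags of one entry, seen through get?
theorem pvInnerB {β : Type} (g : String → List β) (ts : List String) (hnd : ts.Nodup)
    (d : PySem.Dict String (List β)) (t : String) :
    (ts.foldl (fun d t' => d.insert t' (d.getD t' [] ++ g t')) d).get? t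
      = if t ∈ ts then some (d.getD t [] ++ g t) else d.get? t := by
  induction ts generalizing d with
  | nil => simp
  | cons t' ts ih =>
    obtain ⟨hnm, hnd'⟩ := List.nodup_cons.mp hnd
    rw [List.foldl_cons, ih hnd']
    by_cases h : t = t'
    · subst h
      simp [hnm, PySem.Dict.get?_insert_self]
    · simp [h, PySem.Dict.getD_insert, PySem.Dict.get?_insert]

-- B's index fold characterized
theorem pvIdx {β : Type} (f : String → Int × List String → List β)
    (E : List (Int × List String)) (d : PySem.Dict String (List β)) (t : String) :
    (E.foldl (fun d p => (PySem.List.dedup p.2).foldl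
        (fun d t' => d.insert t' (d.getD t' [] ++ f t' p)) d) d).get? t
      = match d.get? t with
        | some v => some (v ++ pvBlk f t E)
        | none => if E.any (fun p => p.2.contains t) then some (pvBlk f t E) else none := by
  induction E generalizing d with
  | nil =>
    cases hd : d.get? t <;> simp [pvBlk, hd]
  | cons p E ih =>
    rw [List.foldl_cons, List.any_cons, ih, pvInnerB _ _ (PySem.List.nodup_dedup p.2) d t]
    by_cases h : p.2.contains t = true
    · have ht : t ∈ PySem.List.dedup p.2 := by simpa [PySem.List.mem_dedup] using h
      rw [if_pos ht, pvBlk_cons_pos f t p E h, h, Bool.true_or]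
      cases hd : d.get? t with
      | some v =>
        have hv : d.getD t [] = v := by rw [PySem.Dict.getD_eq_get?_getD, hd]; rfl
        simp [hv, List.append_assoc]
      | none =>
        have hv : d.getD t [] = [] := by rw [PySem.Dict.getD_eq_get?_getD, hd]; rfl
        simp [hv]
    · have h' : p.2.contains t = false := by simpa using h
      have ht : t ∉ PySem.List.dedup p.2 := by simpa [PySem.List.mem_dedup] using h
      rw [if_neg ht, pvBlk_cons_neg f t p E h', h', Bool.false_or]

theorem pvContains (L : List String) (k : String) :
    PySem.Set.contains (PySem.Set.ofList L) k = L.contains k := by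
  simp [pysem]

-- B's index builder, one side at a time
def pvIdxD {β : Type} (f : String → Int × List String → List β) (E : List (Int × List String)) :
    PySem.Dict String (List β) :=
  E.foldl (fun d p => (PySem.List.dedup p.2).foldl
    (fun d t => d.insert t (d.getD t [] ++ f t p)) d) PySem.Dict.empty

theorem pvIdxD_get? {β : Type} (f : String → Int × List String → List β)
    (E : List (Int × List String)) (t : String) :
    (pvIdxD f E).get? t
      = if E.any (fun p => p.2.contains t) then some (pvBlk f t E) else none := by
  rw [pvIdxD, pvIdx]
  simp

theorem pvIdxD_contains {β : Type} (f : String → Int × List String → List β)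
    (E : List (Int × List String)) (t : String) :
    (pvIdxD f E).contains t = E.any (fun p => p.2.contains t) := by
  rw [PySem.Dict.contains_eq_isSome_get?, pvIdxD_get?]
  by_cases h : E.any (fun p => p.2.contains t) = true
  · rw [if_pos h, h]
    rfl
  · have h' : E.any (fun p => p.2.contains t) = false := by simpa using h
    rw [if_neg h, h']
    rfl

theorem pvIdxD_getD {β : Type} (f : String → Int × List String → List β)
    (E : List (Int × List String)) (t : String) (h : E.any (fun p => p.2.contains t) = true) :
    (pvIdxD f E).getD t [] = pvBlk f t E := by
  rw [PySem.Dict.getD_eq_get?_getD, pvIdxD_get?, if_pos h]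
  rfl

-- B's single index-building pass with a pair accumulator is the two one-sided passes
theorem pvIdxSplit (cond : String → Bool) (E : List (Int × List String))
    (s : PySem.Dict String (List Int) × PySem.Dict String (List String)) :
    E.foldl (fun idx p => (PySem.List.dedup p.2).foldl (fun idx t =>
        (idx.1.insert t (idx.1.getD t [] ++ [p.1]),
         idx.2.insert t (idx.2.getD t [] ++ p.2.filter (fun j => j != t && cond j)))) idx) s
      = (E.foldl (fun d p => (PySem.List.dedup p.2).foldl
            (fun d t => d.insert t (d.getD t [] ++ [p.1])) d) s.1,
         E.foldl (fun d p => (PySem.List.dedup p.2).foldl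
            (fun d t => d.insert t (d.getD t [] ++ p.2.filter (fun j => j != t && cond j))) d) s.2) := by
  induction E generalizing s with
  | nil => rfl
  | cons p E ih =>
    obtain ⟨a, b⟩ := s
    have hinner := PySem.List.foldl_prod_mk
      (fun (d : PySem.Dict String (List Int)) t => d.insert t (d.getD t [] ++ [p.1]))
      (fun (d : PySem.Dict String (List String)) t =>
        d.insert t (d.getD t [] ++ p.2.filter (fun j => j != t && cond j)))
      (PySem.List.dedup p.2) a b
    rw [List.foldl_cons, hinner, ih, List.foldl_cons, List.foldl_cons]

-- B's single assembly loop with a pair accumulator is the two one-sided loops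
theorem pvOutSplit (c : String → Bool) (vI : String → List Int) (vC : String → List String)
    (L : List String) (s : PySem.Dict String (List Int) × PySem.Dict String (List String)) :
    L.foldl (fun o tag => if c tag then
        (o.1.insert tag (o.1.getD tag [] ++ vI tag),
         o.2.insert tag (o.2.getD tag [] ++ vC tag)) else o) s
      = (L.foldl (fun d tag => if c tag then d.insert tag (d.getD tag [] ++ vI tag) else d) s.1,
         L.foldl (fun d tag => if c tag then d.insert tag (d.getD tag [] ++ vC tag) else d) s.2) := by
  induction L generalizing s with
  | nil => rfl
  | cons tag L ih =>
    obtain ⟨a, b⟩ := s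
    rw [List.foldl_cons, List.foldl_cons, List.foldl_cons, ih]
    by_cases h : c tag = true <;> simp [h]

theorem pvIdxSplit0 (cond : String → Bool) (E : List (Int × List String)) :
    E.foldl (fun idx p => (PySem.List.dedup p.2).foldl (fun idx t =>
        (idx.1.insert t (idx.1.getD t [] ++ [p.1]),
         idx.2.insert t (idx.2.getD t [] ++ p.2.filter (fun j => j != t && cond j)))) idx)
      (PySem.Dict.empty, PySem.Dict.empty)
      = (pvIdxD (fun _ p => [p.1]) E,
         pvIdxD (fun t p => p.2.filter (fun j => j != t && cond j)) E) := by
  rw [pvIdxSplit]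
  rfl

-- A's rescan-per-tag loop equals B's lookup-per-tag loop over the prebuilt index
theorem pvSide {β : Type} (f : String → Int × List String → List β)
    (E : List (Int × List String)) (L : List String) :
    L.foldl (fun d tag => E.foldl (fun d p =>
        if p.2.contains tag then d.insert tag (d.getD tag [] ++ f tag p) else d) d) PySem.Dict.empty
      = L.foldl (fun d tag => if E.any (fun p => p.2.contains tag) then
          d.insert tag (d.getD tag [] ++ (pvIdxD f E).getD tag []) else d) PySem.Dict.empty := by
  congr 1
  funext d tag
  rw [pvInnerA]
  by_cases h : E.any (fun p => p.2.contains tag) = true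
  · rw [if_pos h, if_pos h, pvIdxD_getD f E tag h]
  · have h' : E.any (fun p => p.2.contains tag) = false := by simpa using h
    rw [h']
    simp

-- ===== VERDICT (by name: the statement is the Claim_ definition above) =====
theorem tweet_hashtags_spec : Claim_equal_tweet_hashtags := by
  intro hashtags_dict list_hashtags _
  unfold Spec_tweet_hashtags tweet_hashtags tweet_hashtags_alt
  simp only [pvContains]
  simp only [pvIdxSplit0]
  simp only [pvOutSplit]
  simp only [pvIdxD_contains]
  rw [← pvSide (fun _ p => [p.1]),
    ← pvSide (fun t p => p.2.filter (fun j => j != t && list_hashtags.contains j))]
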